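-- pv_equiv track=rewrite | github.com/zh805/algorithm | leetcode/python/leetcode/editor/cn/[720]词典中最长的单词.py | longestWord
-- ===== SOURCE A (Python) =====
-- from typing import List
--
-- class Trie:
--     def __init__(self):
--         self.is_end = False
--         self.nex = [None for _ in range(26)]
--
--     def insert(self, word):
--         # 单词插入前缀树
--         cur = self
--         for ch in word:
--             if not cur.nex[ord(ch) - ord('a')]:
--                 cur.nex[ord(ch) - ord('a')] = Trie()
--             cur = cur.nex[ord(ch) - ord('a')]
--         cur.is_end = True
--
--     def valid(self, word):
--         # word是否由其他单词逐步添加一个字母组成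
--         cur = self
--         for ch in word:
--             nex = cur.nex[ord(ch) - ord('a')]
--             if not nex:
--                 return False
--             if not nex.is_end:
--                 return False
--
--             cur = nex
--         return True
--
-- def longestWord(words: List[str]) -> str:
--     """
--     方法2：前缀树。
--     1.构建前缀树，把所有单词加入
--     2.遍历words，若单词符合要求，更新答案。
--     """
--     root = Trie()
--     for word in words:
--         root.insert(word)
--
--     res = ''
--     for w in words:
--         if root.valid(w):
--             if len(w) > len(res):
--                 res = w
--             elif len(w) == len(res):
--                 res = w if w < res else res
--     return res
-- ===== SOURCE B (Python) =====
-- def longestWord(words):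
--     s = set(words)
--
--     def buildable(w):
--         # w is buildable one letter at a time iff every nonempty prefix is a word
--         return all(w[:i] in s for i in range(1, len(w) + 1))
--
--     res = ''
--     for w in words:
--         if buildable(w):
--             if len(w) > len(res):
--                 res = w
--             elif len(w) == len(res):
--                 res = w if w < res else res
--     return res
-- ===== Notes on version B (the rewrite author's own statement) =====
-- stated objective: simpler
-- what changed: Drops the Trie class entirely: a word is judged buildable by testing every nonempty prefix for membership in a set of the words, replacing the node-by-node trie construction and traversal; the final selection loop is unchanged.
-- outside the precondition, e.g. on longestWord(['a', 'ab', 'Gb']): A returns 'Gb', B returns 'ab'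
import Mathlib
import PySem

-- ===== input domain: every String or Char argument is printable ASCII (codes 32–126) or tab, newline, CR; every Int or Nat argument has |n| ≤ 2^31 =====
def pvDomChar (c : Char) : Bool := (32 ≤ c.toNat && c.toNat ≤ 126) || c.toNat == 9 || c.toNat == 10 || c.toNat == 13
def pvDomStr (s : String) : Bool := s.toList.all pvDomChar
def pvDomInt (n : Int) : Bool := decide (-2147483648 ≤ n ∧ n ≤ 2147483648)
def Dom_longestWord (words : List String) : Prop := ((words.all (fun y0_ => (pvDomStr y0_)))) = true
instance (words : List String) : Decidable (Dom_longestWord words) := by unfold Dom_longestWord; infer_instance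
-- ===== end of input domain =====

-- B drops the Trie: buildability = every nonempty prefix is in a set of the words (objective: simpler).
-- ===== PORT A =====
-- Python: ord(ch) - ord('a'), used to index the 26-slot child list `nex`.  Inside Pre_ this index is
-- in [0, 25] and equals this value; chars where Python's indexing would raise or wrap are outside Pre_.
def trieSlot (c : Char) : Int := PySem.Int.mod ((c.toNat : Int) - 97) 26

-- The mutable Trie heap is encoded by the node's path of slots from the root: `nodes` is the set of
-- allocated (non-root) node paths, `ends` the set of paths whose node has is_end = True.
-- Trie.insert: walk the word, allocating each child on the way, then mark the final node.
def trieInsert (st : PySem.Set (List Int) × PySem.Set (List Int)) (w : String) :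
    PySem.Set (List Int) × PySem.Set (List Int) :=
  let r := w.toList.foldl (fun (p : PySem.Set (List Int) × List Int) c =>
      (PySem.Set.add p.1 (p.2 ++ [trieSlot c]), p.2 ++ [trieSlot c])) (st.1, [])
  (r.1, PySem.Set.add st.2 r.2)

-- Trie.valid: walk the word; fail if the child is missing or not an end node.
def trieValid (nodes ends : PySem.Set (List Int)) : List Int → List Char → Bool
  | _, [] => true
  | path, c :: cs =>
    if (path ++ [trieSlot c]) ∉ nodes then false
    else if (path ++ [trieSlot c]) ∉ ends then false
    else trieValid nodes ends (path ++ [trieSlot c]) cs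

def longestWord (words : List String) : String :=
  let root := words.foldl trieInsert (PySem.Set.empty, PySem.Set.empty)
  words.foldl (fun res w =>
    if trieValid root.1 root.2 [] w.toList then
      if res.toList.length < w.toList.length then w
      else if w.toList.length = res.toList.length then (if w < res then w else res)
      else res
    else res) ""

-- ===== PORT B =====
-- all(w[:i] in s for i in range(1, len(w)+1)): index i-1 ranges over range(len(w)), w[:i] = take i.
def altBuildable (s : PySem.Set String) (w : String) : Bool :=
  (List.range w.toList.length).all (fun i => String.ofList (w.toList.take (i + 1)) ∈ s)

def longestWord_alt (words : List String) : String :=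
  let s := PySem.Set.ofList words
  words.foldl (fun res w =>
    if altBuildable s w then
      if res.toList.length < w.toList.length then w
      else if w.toList.length = res.toList.length then (if w < res then w else res)
      else res
    else res) ""

-- ===== PRECONDITION & SPEC =====
-- Pre_ excludes words with any character outside 'a'..'z': there A either raises IndexError (codes
-- outside 71..122) or returns a result produced by accidental negative-index wraparound of the
-- 26-slot child list, which aliases distinct characters (e.g. 'G' with 'a') — an artefact no caller
-- would specify; B does the natural prefix test there.
def Pre_longestWord (words : List String) : Prop :=
  (words.all (fun w => w.toList.all (fun c => 97 ≤ c.toNat && c.toNat ≤ 122))) = true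
instance (words : List String) : Decidable (Pre_longestWord words) := by
  unfold Pre_longestWord; infer_instance
def pvWitness_longestWord : List String := ["w", "wo", "wor", "word"]

def Spec_longestWord (words : List String) (out : String) : Prop := out = longestWord_alt words
instance (words : List String) (out : String) : Decidable (Spec_longestWord words out) := by unfold Spec_longestWord; infer_instance

-- ===== CLAIM (what is proved, stated in full; the proofs are below) =====
def Claim_equal_longestWord : Prop := ∀ (words : List String), Dom_longestWord words → Pre_longestWord words → Spec_longestWord words (longestWord words)

-- ===== LEMMAS AND PROOFS =====

-- slot paths
def slotPath (cs : List Char) : List Int := cs.map trieSlot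

theorem trieSlot_lower {c : Char} (h : 97 ≤ c.toNat ∧ c.toNat ≤ 122) :
    trieSlot c = (c.toNat : Int) - 97 := by
  unfold trieSlot
  rw [PySem.Int.mod_eq_emod_of_pos (b := 26) (by norm_num)]
  exact Int.emod_eq_of_lt (by omega) (by omega)

theorem trieSlot_inj {a b : Char} (ha : 97 ≤ a.toNat ∧ a.toNat ≤ 122)
    (hb : 97 ≤ b.toNat ∧ b.toNat ≤ 122) (h : trieSlot a = trieSlot b) : a = b := by
  rw [trieSlot_lower ha, trieSlot_lower hb] at h
  have : a.toNat = b.toNat := by omega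
  rw [← Char.ofNat_toNat a, ← Char.ofNat_toNat b, this]

theorem slotPath_inj {u v : List Char} (hu : ∀ c ∈ u, 97 ≤ c.toNat ∧ c.toNat ≤ 122)
    (hv : ∀ c ∈ v, 97 ≤ c.toNat ∧ c.toNat ≤ 122) (h : slotPath u = slotPath v) : u = v := by
  induction u generalizing v with
  | nil => cases v with
    | nil => rfl
    | cons b t => simp [slotPath] at h
  | cons a t ih =>
    cases v with
    | nil => simp [slotPath] at h
    | cons b t' =>
      simp only [slotPath, List.map_cons, List.cons.injEq] at h
      have h1 := trieSlot_inj (hu a (by simp)) (hv b (by simp)) h.1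
      have h2 := ih (fun c hc => hu c (by simp [hc])) (fun c hc => hv c (by simp [hc])) h.2
      rw [h1, h2]

-- insert's inner fold: final path and node-set membership
theorem insertFold_spec (cs : List Char) (n : PySem.Set (List Int)) (p : List Int) :
    (cs.foldl (fun (q : PySem.Set (List Int) × List Int) c =>
        (PySem.Set.add q.1 (q.2 ++ [trieSlot c]), q.2 ++ [trieSlot c])) (n, p)).2
      = p ++ slotPath cs ∧
    ∀ x, x ∈ (cs.foldl (fun (q : PySem.Set (List Int) × List Int) c =>
        (PySem.Set.add q.1 (q.2 ++ [trieSlot c]), q.2 ++ [trieSlot c])) (n, p)).1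
      ↔ x ∈ n ∨ ∃ t, t <+: cs ∧ t ≠ [] ∧ x = p ++ slotPath t := by
  induction cs generalizing n p with
  | nil => simp [slotPath]
  | cons c cs ih =>
    simp only [List.foldl_cons]
    obtain ⟨h2, h1⟩ := ih (PySem.Set.add n (p ++ [trieSlot c])) (p ++ [trieSlot c])
    constructor
    · rw [h2]; simp [slotPath]
    · intro x
      rw [h1 x, PySem.Set.mem_add]
      constructor
      · rintro ((hx | rfl) | ⟨t, hpre, hne, rfl⟩)
        · exact Or.inl hx
        · exact Or.inr ⟨[c], ⟨cs, rfl⟩, by simp, by simp [slotPath]⟩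
        · exact Or.inr ⟨c :: t, List.cons_prefix_cons.mpr ⟨rfl, hpre⟩, by simp, by simp [slotPath]⟩
      · rintro (hx | ⟨t, hpre, hne, rfl⟩)
        · exact Or.inl (Or.inl hx)
        · match t, hne with
          | t0 :: t', _ =>
            obtain ⟨rfl, hpre'⟩ : t0 = c ∧ t' <+: cs := by
              obtain ⟨r, hr⟩ := hpre
              simp only [List.cons_append, List.cons.injEq] at hr
              exact ⟨hr.1, ⟨r, hr.2⟩⟩
            by_cases ht' : t' = []
            · subst ht'; exact Or.inl (Or.inr (by simp [slotPath]))
            · exact Or.inr ⟨t', hpre', ht', by simp [slotPath]⟩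

theorem trieInsert_fst (st : PySem.Set (List Int) × PySem.Set (List Int)) (w : String) :
    (trieInsert st w).1 = (w.toList.foldl (fun (p : PySem.Set (List Int) × List Int) c =>
      (PySem.Set.add p.1 (p.2 ++ [trieSlot c]), p.2 ++ [trieSlot c])) (st.1, [])).1 := rfl

theorem trieInsert_snd (st : PySem.Set (List Int) × PySem.Set (List Int)) (w : String) :
    (trieInsert st w).2 = PySem.Set.add st.2 ((w.toList.foldl (fun (p : PySem.Set (List Int) × List Int) c =>
      (PySem.Set.add p.1 (p.2 ++ [trieSlot c]), p.2 ++ [trieSlot c])) (st.1, [])).2) := rfl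

-- the outer insert fold: membership in ends and nodes
theorem insertAll_spec (words : List String) (st : PySem.Set (List Int) × PySem.Set (List Int)) :
    (∀ x, x ∈ (words.foldl trieInsert st).2
        ↔ x ∈ st.2 ∨ ∃ u ∈ words, x = slotPath u.toList) ∧
    (∀ x, x ∈ (words.foldl trieInsert st).1
        ↔ x ∈ st.1 ∨ ∃ u ∈ words, ∃ t, t <+: u.toList ∧ t ≠ [] ∧ x = slotPath t) := by
  induction words generalizing st with
  | nil => simp
  | cons w ws ih =>
    simp only [List.foldl_cons]
    obtain ⟨ih2, ih1⟩ := ih (trieInsert st w)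
    obtain ⟨hf2, hf1⟩ := insertFold_spec w.toList st.1 []
    constructor
    · intro x
      rw [ih2 x, trieInsert_snd, PySem.Set.mem_add, hf2]
      simp only [List.nil_append, List.mem_cons]
      constructor
      · rintro ((hx | rfl) | ⟨u, hu, rfl⟩)
        · exact Or.inl hx
        · exact Or.inr ⟨w, Or.inl rfl, rfl⟩
        · exact Or.inr ⟨u, Or.inr hu, rfl⟩
      · rintro (hx | ⟨u, (rfl | hu), rfl⟩)
        · exact Or.inl (Or.inl hx)
        · exact Or.inl (Or.inr rfl)
        · exact Or.inr ⟨u, hu, rfl⟩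
    · intro x
      rw [ih1 x, trieInsert_fst, hf1 x]
      simp only [List.nil_append, List.mem_cons]
      constructor
      · rintro ((hx | ⟨t, hp, hn, rfl⟩) | ⟨u, hu, t, hp, hn, rfl⟩)
        · exact Or.inl hx
        · exact Or.inr ⟨w, Or.inl rfl, t, hp, hn, rfl⟩
        · exact Or.inr ⟨u, Or.inr hu, t, hp, hn, rfl⟩
      · rintro (hx | ⟨u, (rfl | hu), t, hp, hn, rfl⟩)
        · exact Or.inl (Or.inl hx)
        · exact Or.inl (Or.inr ⟨t, hp, hn, rfl⟩)
        · exact Or.inr ⟨u, hu, t, hp, hn, rfl⟩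

-- trieValid walks = every nonempty prefix's node exists and is an end
theorem trieValid_iff (nodes ends : PySem.Set (List Int)) (path : List Int) (cs : List Char) :
    trieValid nodes ends path cs = true
      ↔ ∀ t, t <+: cs → t ≠ [] → (path ++ slotPath t) ∈ nodes ∧ (path ++ slotPath t) ∈ ends := by
  induction cs generalizing path with
  | nil =>
    simp only [trieValid, true_iff]
    intro t ht hn; exact absurd (List.prefix_nil.mp ht) hn
  | cons c cs ih =>
    simp only [trieValid]
    by_cases hn : (path ++ [trieSlot c]) ∈ nodes
    · by_cases he : (path ++ [trieSlot c]) ∈ ends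
      · simp only [hn, he, not_true_eq_false, if_false, ih]
        constructor
        · intro h t ht htn
          match t, htn with
          | t0 :: t', _ =>
            obtain ⟨rfl, hpre'⟩ : t0 = c ∧ t' <+: cs := by
              obtain ⟨r, hr⟩ := ht
              simp only [List.cons_append, List.cons.injEq] at hr
              exact ⟨hr.1, ⟨r, hr.2⟩⟩
            by_cases ht' : t' = []
            · subst ht'; simpa [slotPath] using And.intro hn he
            · have := h t' hpre' ht'
              simpa [slotPath] using this
        · intro h t ht htn
          have := h (c :: t) (List.cons_prefix_cons.mpr ⟨rfl, ht⟩) (by simp)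
          simpa [slotPath] using this
      · simp only [hn, he, not_true_eq_false, if_false, not_false_eq_true, if_true]
        constructor
        · intro h; exact absurd h (by simp)
        · intro h
          have := (h [c] ⟨cs, rfl⟩ (by simp)).2
          simp [slotPath] at this
          exact absurd this he
    · simp only [hn, not_false_eq_true, if_true]
      constructor
      · intro h; exact absurd h (by simp)
      · intro h
        have := (h [c] ⟨cs, rfl⟩ (by simp)).1
        simp [slotPath] at this
        exact absurd this hn

-- nonempty prefixes of cs are exactly the takes
theorem prefix_iff_take (t cs : List Char) :
    (t <+: cs ∧ t ≠ []) ↔ ∃ i, i < cs.length ∧ t = cs.take (i + 1) := by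
  constructor
  · rintro ⟨hp, hn⟩
    refine ⟨t.length - 1, ?_, ?_⟩
    · have := hp.length_le
      have : t.length ≠ 0 := by simpa using hn
      omega
    · have hlen : t.length - 1 + 1 = t.length := by
        have : t.length ≠ 0 := by simpa using hn
        omega
      rw [hlen]
      exact List.prefix_iff_eq_take.mp hp
  · rintro ⟨i, hi, rfl⟩
    refine ⟨List.take_prefix _ _, fun h => ?_⟩
    rcases List.take_eq_nil_iff.mp h with h | h
    · omega
    · subst h; simp at hi

-- the two buildability tests agree under Pre_
theorem pre_chars {words : List String} (h : Pre_longestWord words) :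
    ∀ w ∈ words, ∀ c ∈ w.toList, 97 ≤ c.toNat ∧ c.toNat ≤ 122 := by
  simpa [Pre_longestWord, List.all_eq_true] using h

theorem valid_eq_buildable (words : List String)
    (hpre : ∀ w ∈ words, ∀ c ∈ w.toList, 97 ≤ c.toNat ∧ c.toNat ≤ 122)
    (w : String) (hw : w ∈ words) :
    trieValid (words.foldl trieInsert (PySem.Set.empty, PySem.Set.empty)).1
              (words.foldl trieInsert (PySem.Set.empty, PySem.Set.empty)).2 [] w.toList
      = altBuildable (PySem.Set.ofList words) w := by
  obtain ⟨hE, hN⟩ := insertAll_spec words (PySem.Set.empty, PySem.Set.empty)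
  have hends : ∀ x, x ∈ (words.foldl trieInsert (PySem.Set.empty, PySem.Set.empty)).2
      ↔ ∃ u ∈ words, x = slotPath u.toList := by
    intro x; rw [hE x]; simp [PySem.Set.empty]
  have hnodes : ∀ x, x ∈ (words.foldl trieInsert (PySem.Set.empty, PySem.Set.empty)).1
      ↔ ∃ u ∈ words, ∃ t, t <+: u.toList ∧ t ≠ [] ∧ x = slotPath t := by
    intro x; rw [hN x]; simp [PySem.Set.empty]
  -- prefix-in-ends implies prefix-in-nodes (a word's own full path was allocated)
  have key : ∀ t, t <+: w.toList → t ≠ [] →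
      ((slotPath t ∈ (words.foldl trieInsert (PySem.Set.empty, PySem.Set.empty)).2)
        ↔ String.ofList t ∈ words) := by
    intro t ht htn
    rw [hends]
    constructor
    · rintro ⟨u, hu, hx⟩
      have hteq : t = u.toList := slotPath_inj
        (fun c hc => hpre w hw c (ht.subset hc))
        (fun c hc => hpre u hu c hc) hx
      rw [hteq, String.ofList_toList]; exact hu
    · intro hmem
      exact ⟨String.ofList t, hmem, by rw [slotPath, slotPath, String.toList_ofList]⟩
  rw [Bool.eq_iff_iff, trieValid_iff, altBuildable]
  simp only [List.all_eq_true, List.mem_range, PySem.Set.mem_ofList, decide_eq_true_eq]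
  constructor
  · intro h i hi
    have hp : (w.toList.take (i + 1)) <+: w.toList := List.take_prefix _ _
    have hn : (w.toList.take (i + 1)) ≠ [] := by
      intro h
      rcases List.take_eq_nil_iff.mp h with h | h
      · omega
      · rw [h] at hi; simp at hi
    have := (h _ hp hn).2
    simpa using (key _ hp hn).mp (by simpa using this)
  · intro h t ht htn
    obtain ⟨i, hi, rfl⟩ := (prefix_iff_take _ _).mp ⟨ht, htn⟩
    have hend : slotPath (w.toList.take (i + 1)) ∈ (words.foldl trieInsert (PySem.Set.empty, PySem.Set.empty)).2 := by
      exact (key _ ht htn).mpr (h i hi)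
    constructor
    · rw [hnodes]
      exact ⟨w, hw, w.toList.take (i + 1), ht, htn, rfl⟩
    · simpa using hend

-- ===== VERDICT (by name: the statement is the Claim_ definition above) =====
theorem longestWord_spec : Claim_equal_longestWord := by
  intro words _ hpre
  unfold Spec_longestWord longestWord longestWord_alt
  apply PySem.List.foldl_congr_mem
  intro res w hw
  rw [valid_eq_buildable words (pre_chars hpre) w hw]
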